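-- pv_equiv track=rewrite | github.com/chris45724/Kris-Stuff | Projects/PythonProjects/Modules/Encoders.py | arrowDecode
-- ===== SOURCE A (Python) =====
-- def customArrowDecode(code : str):
--     output = 0
--     for position in range(int(len(code))):
--         power = (int(len(code))-position) - 1
--         solution = 0
--         #here = code[position]
--         if code[position] == '>':
--                 solution = solution + 2*(3**power)
--         elif code[position] == '<':
--                 solution = solution + (3**power)
--         output = output + int(solution)
--
--     return output
--
-- def krisKey():
--     return list(['0', '1', '2', '3', '4', '5', '6', '7', '8', '9', 'a', 'A', 'b', 'B', 'c', 'C', 'd', 'D', 'e', 'E', 'f', 'F', 'g', 'G', 'h', 'H', 'i', 'I', 'j', 'J', 'k', 'K', 'l', 'L', 'm', 'M', 'n', 'N', 'o', 'O', 'p', 'P', 'q', 'Q', 'r', 'R', 's', 'S', 't', 'T', 'u', 'U', 'v', 'V', 'w', 'W', 'x', 'X', 'y', 'Y', 'z', 'Z', ' ', '.', '?', '!', '\'', '\"', '(', ')', ';', ':', '@', '-', '>', '<', '_', '/','\\' , '☃', '�'])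
--
-- def krisDecode(character : int):
--     character = int(character)
--     key = krisKey()
--     return(key[character])
--
-- def arrowDecode(text : str):
--     output = ""
--     letters = int(len(text)/4)
--     for group in range(letters):
--         letter = ""
--         for x in range(4):
--             letter = letter + text[(group*4)+ (x)]
--         output = output + krisDecode(customArrowDecode(letter))
--
--
--     #krisDecode(customArrowDecode()
--
--     return output
-- ===== SOURCE B (Python) =====
-- _KEY = ['0', '1', '2', '3', '4', '5', '6', '7', '8', '9', 'a', 'A', 'b', 'B', 'c', 'C', 'd', 'D', 'e', 'E', 'f', 'F', 'g', 'G', 'h', 'H', 'i', 'I', 'j', 'J', 'k', 'K', 'l', 'L', 'm', 'M', 'n', 'N', 'o', 'O', 'p', 'P', 'q', 'Q', 'r', 'R', 's', 'S', 't', 'T', 'u', 'U', 'v', 'V', 'w', 'W', 'x', 'X', 'y', 'Y', 'z', 'Z', ' ', '.', '?', '!', '\'', '\"', '(', ')', ';', ':', '@', '-', '>', '<', '_', '/', '\\', '\u2603', '\ufffd']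
--
--
-- def _digit(c):
--     return 2 if c == '>' else 1 if c == '<' else 0
--
--
-- def arrowDecode(text: str):
--     # Encode the whole (truncated) input as ONE base-3 integer with a single
--     # Horner pass, then peel the letters off its low end by repeated
--     # divmod(N, 81), emitting the output right-to-left.
--     m = len(text) // 4 * 4
--     N = 0
--     for c in text[:m]:
--         N = N * 3 + _digit(c)
--     chars = []
--     for _ in range(m // 4):
--         N, r = divmod(N, 81)
--         chars.append(_KEY[r])
--     return ''.join(reversed(chars))
-- ===== Notes on version B (the rewrite author's own statement) =====
-- stated objective: alternative
-- what changed: Instead of looping over groups and summing digit*3**power per 4-char group, B encodes the whole truncated input as one big base-3 integer in a single Horner pass and then extracts the letters back-to-front by repeated divmod(N, 81), reversing the collected characters at the end.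
import Mathlib
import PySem

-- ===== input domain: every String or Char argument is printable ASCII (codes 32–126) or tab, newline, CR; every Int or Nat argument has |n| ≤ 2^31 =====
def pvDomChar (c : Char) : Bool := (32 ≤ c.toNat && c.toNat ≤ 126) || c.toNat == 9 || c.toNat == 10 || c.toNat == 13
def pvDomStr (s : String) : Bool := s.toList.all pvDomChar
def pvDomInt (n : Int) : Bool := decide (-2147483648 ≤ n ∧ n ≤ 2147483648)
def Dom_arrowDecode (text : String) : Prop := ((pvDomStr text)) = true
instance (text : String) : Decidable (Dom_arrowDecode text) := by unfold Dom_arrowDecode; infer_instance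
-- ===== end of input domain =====

-- B replaces A's per-group power sums by one global base-3 Horner pass and divmod(·,81) peeling
-- (back-to-front output); alternative algorithm, same return value.

-- ===== PORT A =====
def pvKrisKey : List Char :=
  ['0', '1', '2', '3', '4', '5', '6', '7', '8', '9', 'a', 'A', 'b', 'B', 'c', 'C', 'd', 'D',
   'e', 'E', 'f', 'F', 'g', 'G', 'h', 'H', 'i', 'I', 'j', 'J', 'k', 'K', 'l', 'L', 'm', 'M',
   'n', 'N', 'o', 'O', 'p', 'P', 'q', 'Q', 'r', 'R', 's', 'S', 't', 'T', 'u', 'U', 'v', 'V',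
   'w', 'W', 'x', 'X', 'y', 'Y', 'z', 'Z', ' ', '.', '?', '!', '\'', '\"', '(', ')', ';', ':',
   '@', '-', '>', '<', '_', '/', '\\', '☃', '�']

-- customArrowDecode: sum of digit·3**power over the positions;
-- Python's 3**power is exact as 3 ^ power.toNat here since 0 ≤ power for every position in range(len(code))
def customArrowDecode (code : List Char) : Int :=
  (PySem.List.pyRange 0 (code.length : Int) 1).foldl
    (fun output position =>
      let power : Int := ((code.length : Int) - position) - 1
      let solution : Int :=
        if PySem.List.pyGet? code position = some '>' then 0 + 2 * (3 ^ power.toNat)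
        else if PySem.List.pyGet? code position = some '<' then 0 + 3 ^ power.toNat
        else 0
      output + solution) 0

-- key[character]; on every index A produces (a 4-char group value, 0..80) the IndexError branch is unreachable
def krisDecode (character : Int) : Char :=
  (PySem.List.pyGet? pvKrisKey character).getD '0'

def arrowDecode (text : String) : String :=
  let l := text.toList
  let letters : Nat := l.length / 4          -- int(len(text)/4)
  String.ofList ((PySem.List.pyRange 0 (letters : Int) 1).foldl
    (fun output group =>
      let letter := (PySem.List.pyRange 0 4 1).foldl
        (fun letter x => letter ++ [(PySem.List.pyGet? l (group * 4 + x)).getD ' ']) []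
      output ++ [krisDecode (customArrowDecode letter)]) [])

-- ===== PORT B =====
def pvDigit (c : Char) : Int := if c = '>' then 2 else if c = '<' then 1 else 0

def arrowDecode_alt (text : String) : String :=
  let l := text.toList
  let m : Nat := l.length / 4 * 4
  -- single Horner pass over text[:m]: the whole input as one base-3 integer
  let N : Int := (l.take m).foldl (fun a c => a * 3 + pvDigit c) 0
  -- peel m/4 letters by divmod(N, 81); consing = append-then-reverse of Source B
  let st := (PySem.List.pyRange 0 ((m / 4 : Nat) : Int) 1).foldl
    (fun (st : Int × List Char) _ =>
      (PySem.Int.floordiv st.1 81,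
       (PySem.List.pyGet? pvKrisKey (PySem.Int.mod st.1 81)).getD '0' :: st.2))
    (N, [])
  String.ofList st.2

-- ===== PRECONDITION & SPEC =====
def Spec_arrowDecode (text : String) (out : String) : Prop := out = arrowDecode_alt text
instance (text : String) (out : String) : Decidable (Spec_arrowDecode text out) := by
  unfold Spec_arrowDecode; infer_instance

-- ===== CLAIM (what is proved, stated in full; the proofs are below) =====
def Claim_equal_arrowDecode : Prop :=
  ∀ (text : String), Dom_arrowDecode text → Spec_arrowDecode text (arrowDecode text)

-- ===== LEMMAS AND PROOFS =====

-- the common per-4-chunk reading both proofs meet at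
def pvChunks : List Char → List Char
  | a :: b :: c :: d :: rest =>
      (PySem.List.pyGet? pvKrisKey
        (27 * pvDigit a + 9 * pvDigit b + 3 * pvDigit c + pvDigit d)).getD '0' :: pvChunks rest
  | _ => []

lemma pvDigit_bounds (c : Char) : 0 ≤ pvDigit c ∧ pvDigit c ≤ 2 := by
  unfold pvDigit; split_ifs <;> omega

-- ---- A side ----

lemma customArrowDecode_quad (a b c d : Char) :
    customArrowDecode [a, b, c, d] =
      27 * pvDigit a + 9 * pvDigit b + 3 * pvDigit c + pvDigit d := by
  have hr : PySem.List.pyRange 0 (4:Int) 1 = [0,1,2,3] := by decide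
  have hl : (([a,b,c,d] : List Char).length : Int) = 4 := by simp
  have g0 : PySem.List.pyGet? [a,b,c,d] (0:Int) = some a := by
    simp [PySem.List.pyGet?, PySem.List.pyIdx?]
  have g1 : PySem.List.pyGet? [a,b,c,d] (1:Int) = some b := by
    simp [PySem.List.pyGet?, PySem.List.pyIdx?]
  have g2 : PySem.List.pyGet? [a,b,c,d] (2:Int) = some c := by
    simp [PySem.List.pyGet?, PySem.List.pyIdx?]
  have g3 : PySem.List.pyGet? [a,b,c,d] (3:Int) = some d := by
    simp [PySem.List.pyGet?, PySem.List.pyIdx?]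
  simp only [customArrowDecode, hl, hr, List.foldl_cons, List.foldl_nil, g0, g1, g2, g3,
    Option.some.injEq]
  norm_num
  unfold pvDigit
  split_ifs <;> decide

lemma get4 (a b c d : Char) (rest : List Char) (n : Nat) :
    (a :: b :: c :: d :: rest)[4 + n]? = rest[n]? := by
  have : 4 + n = n + 1 + 1 + 1 + 1 := by omega
  rw [this]
  simp [List.getElem?_cons_succ]

lemma letter_eq (l : List Char) (k : Nat) :
    (PySem.List.pyRange 0 4 1).foldl
      (fun letter x => letter ++ [(PySem.List.pyGet? l ((k : Int) * 4 + x)).getD ' ']) [] =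
    [(l[k*4]?).getD ' ', (l[k*4+1]?).getD ' ', (l[k*4+2]?).getD ' ', (l[k*4+3]?).getD ' '] := by
  have hr : PySem.List.pyRange 0 (4:Int) 1 = [0,1,2,3] := by decide
  have e0 : ((k : Int) * 4 + 0) = ((k*4 : Nat) : Int) := by push_cast; ring
  have e1 : ((k : Int) * 4 + 1) = ((k*4+1 : Nat) : Int) := by push_cast; ring
  have e2 : ((k : Int) * 4 + 2) = ((k*4+2 : Nat) : Int) := by push_cast; ring
  have e3 : ((k : Int) * 4 + 3) = ((k*4+3 : Nat) : Int) := by push_cast; ring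
  simp only [hr, List.foldl_cons, List.foldl_nil, e0, e1, e2, e3, PySem.List.pyGet?_natCast]
  simp

lemma A_map (l : List Char) :
    (List.range (l.length / 4)).map
      (fun (k : Nat) => krisDecode (customArrowDecode
        ((PySem.List.pyRange 0 4 1).foldl
          (fun letter x => letter ++ [(PySem.List.pyGet? l ((k : Int) * 4 + x)).getD ' ']) []))) =
      pvChunks l := by
  induction l using pvChunks.induct with
  | case1 a b c d rest ih =>
    simp only [letter_eq] at *
    have hlen : (a :: b :: c :: d :: rest).length / 4 = rest.length / 4 + 1 := by
      simp [List.length_cons]; omega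
    rw [hlen, List.range_succ_eq_map, List.map_cons, List.map_map]
    rw [pvChunks]
    congr 1
    · norm_num
      rw [customArrowDecode_quad]
      rfl
    · rw [← ih]
      refine List.map_congr_left (fun j _ => ?_)
      show krisDecode (customArrowDecode
          [((a::b::c::d::rest)[(j+1)*4]?).getD ' ', ((a::b::c::d::rest)[(j+1)*4+1]?).getD ' ',
           ((a::b::c::d::rest)[(j+1)*4+2]?).getD ' ', ((a::b::c::d::rest)[(j+1)*4+3]?).getD ' ']) = _
      rw [show (j+1)*4 = 4 + j*4 by omega]
      rw [show 4 + j*4 + 1 = 4 + (j*4+1) by omega, show 4 + j*4 + 2 = 4 + (j*4+2) by omega,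
          show 4 + j*4 + 3 = 4 + (j*4+3) by omega]
      rw [get4, get4, get4, get4]
  | case2 l h =>
    rcases l with _ | ⟨a, _ | ⟨b, _ | ⟨c, _ | ⟨d, rest⟩⟩⟩⟩
    · simp [pvChunks]
    · simp [pvChunks]
    · simp [pvChunks]
    · simp [pvChunks]
    · exact absurd rfl (h a b c d rest)

lemma A_eq_chunks (text : String) : arrowDecode text = String.ofList (pvChunks text.toList) := by
  unfold arrowDecode
  simp only [PySem.List.foldl_append_singleton_eq_map, List.nil_append,
    PySem.List.pyRange_one, Int.sub_zero, Int.toNat_natCast, List.map_map,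
    zero_add]
  exact congrArg String.ofList (A_map text.toList)

-- ---- B side ----

lemma horner_shift (ds : List Char) (a : Int) :
    ds.foldl (fun x c => x * 3 + pvDigit c) a =
      a * 3 ^ ds.length + ds.foldl (fun x c => x * 3 + pvDigit c) 0 := by
  induction ds generalizing a with
  | nil => simp
  | cons c ds ih =>
    simp only [List.foldl_cons, List.length_cons]
    rw [ih (a * 3 + pvDigit c), ih (0 * 3 + pvDigit c)]
    ring

lemma horner_bounds (ds : List Char) :
    0 ≤ ds.foldl (fun x c => x * 3 + pvDigit c) 0 ∧
      ds.foldl (fun x c => x * 3 + pvDigit c) 0 < 3 ^ ds.length := by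
  induction ds with
  | nil => simp
  | cons c ds ih =>
    simp only [List.foldl_cons, List.length_cons]
    rw [horner_shift]
    have hd := pvDigit_bounds c
    have hp : (0 : Int) < 3 ^ ds.length := by positivity
    constructor
    · nlinarith [ih.1]
    · have h3 : (3 : Int) ^ (ds.length + 1) = 3 * 3 ^ ds.length := by ring
      rw [h3]
      nlinarith [ih.2]

def pvDecodeN : Nat → Int → List Char
  | 0, _ => []
  | k + 1, N =>
      pvDecodeN k (PySem.Int.floordiv N 81) ++
        [(PySem.List.pyGet? pvKrisKey (PySem.Int.mod N 81)).getD '0']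

lemma foldl_const {β γ : Type} (xs : List β) (f : γ → γ) (init : γ) :
    xs.foldl (fun st _ => f st) init = f^[xs.length] init := by
  induction xs generalizing init with
  | nil => rfl
  | cons x xs ih => simp [List.foldl_cons, ih, Function.iterate_succ_apply]

lemma peel_iterate (k : Nat) (N : Int) (acc : List Char) :
    ((fun (st : Int × List Char) =>
        (PySem.Int.floordiv st.1 81,
         (PySem.List.pyGet? pvKrisKey (PySem.Int.mod st.1 81)).getD '0' :: st.2))^[k]
      (N, acc)).2 = pvDecodeN k N ++ acc := by
  induction k generalizing N acc with
  | zero => simp [pvDecodeN]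
  | succ k ih =>
    rw [Function.iterate_succ_apply]
    rw [ih]
    simp [pvDecodeN]

lemma pvDecodeN_shift (k : Nat) (v Nr : Int) (hv0 : 0 ≤ v) (hv : v < 81)
    (hn0 : 0 ≤ Nr) (hn : Nr < 81 ^ k) :
    pvDecodeN (k + 1) (v * 81 ^ k + Nr) =
      (PySem.List.pyGet? pvKrisKey v).getD '0' :: pvDecodeN k Nr := by
  induction k generalizing v Nr with
  | zero =>
    have h0 : Nr = 0 := by omega
    subst h0
    simp only [pow_zero, mul_one, add_zero, pvDecodeN]
    rw [PySem.Int.mod_eq_emod_of_pos (by norm_num)]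
    rw [Int.emod_eq_of_lt hv0 hv]
    simp
  | succ k ih =>
    have h81 : (0:Int) < 81 := by norm_num
    show pvDecodeN (k+2) _ = _
    rw [pvDecodeN]
    have hfd : PySem.Int.floordiv (v * 81 ^ (k+1) + Nr) 81
        = v * 81 ^ k + PySem.Int.floordiv Nr 81 := by
      rw [PySem.Int.floordiv_eq_ediv_of_pos h81, PySem.Int.floordiv_eq_ediv_of_pos h81]
      have h : v * 81 ^ (k+1) + Nr = Nr + (v * 81 ^ k) * 81 := by ring
      rw [h, Int.add_mul_ediv_right _ _ (by norm_num : (81:Int) ≠ 0)]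
      ring
    have hmd : PySem.Int.mod (v * 81 ^ (k+1) + Nr) 81 = PySem.Int.mod Nr 81 := by
      rw [PySem.Int.mod_eq_emod_of_pos h81, PySem.Int.mod_eq_emod_of_pos h81]
      have h : v * 81 ^ (k+1) + Nr = Nr + (v * 81 ^ k) * 81 := by ring
      rw [h, Int.add_mul_emod_self_right]
    rw [hfd, hmd]
    have hq0 : 0 ≤ PySem.Int.floordiv Nr 81 := by
      rw [PySem.Int.floordiv_eq_ediv_of_pos h81]; exact Int.ediv_nonneg hn0 (by norm_num)
    have hq : PySem.Int.floordiv Nr 81 < 81 ^ k := by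
      rw [PySem.Int.floordiv_eq_ediv_of_pos h81]
      have h : Nr < 81 ^ k * 81 := by rw [← pow_succ]; exact hn
      exact Int.ediv_lt_of_lt_mul h81 h
    rw [ih v (PySem.Int.floordiv Nr 81) hv0 hv hq0 hq]
    rw [pvDecodeN]
    simp

lemma B_decode (l : List Char) :
    pvDecodeN (l.length / 4)
        ((l.take (l.length / 4 * 4)).foldl (fun a c => a * 3 + pvDigit c) 0) = pvChunks l := by
  induction l using pvChunks.induct with
  | case1 a b c d rest ih =>
    have hk : (a :: b :: c :: d :: rest).length / 4 = rest.length / 4 + 1 := by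
      simp [List.length_cons]; omega
    set k := rest.length / 4 with hkdef
    rw [hk]
    have htake : (a :: b :: c :: d :: rest).take ((k + 1) * 4)
        = a :: b :: c :: d :: rest.take (k * 4) := by
      rw [show (k + 1) * 4 = (((k * 4) + 1) + 1 + 1) + 1 by ring]
      simp [List.take_succ_cons]
    rw [htake]
    simp only [List.foldl_cons]
    set N' := (rest.take (k * 4)).foldl (fun x c => x * 3 + pvDigit c) 0 with hN'
    have hlen : (rest.take (k * 4)).length = k * 4 := by
      rw [List.length_take]
      exact Nat.min_eq_left (Nat.div_mul_le_self rest.length 4)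
    have hb := horner_bounds (rest.take (k * 4))
    rw [← hN'] at hb
    rw [hlen] at hb
    have h81 : (3 : Int) ^ (k * 4) = 81 ^ k := by
      rw [mul_comm, pow_mul]; norm_num
    rw [h81] at hb
    have hfold : (rest.take (k * 4)).foldl (fun x c => x * 3 + pvDigit c)
        ((((0 * 3 + pvDigit a) * 3 + pvDigit b) * 3 + pvDigit c) * 3 + pvDigit d)
        = (27 * pvDigit a + 9 * pvDigit b + 3 * pvDigit c + pvDigit d) * 81 ^ k + N' := by
      rw [horner_shift, hlen, h81, ← hN']
      ring
    rw [hfold]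
    have hv0 : 0 ≤ 27 * pvDigit a + 9 * pvDigit b + 3 * pvDigit c + pvDigit d := by
      have ha := pvDigit_bounds a; have hbb := pvDigit_bounds b
      have hc := pvDigit_bounds c; have hd := pvDigit_bounds d
      omega
    have hv1 : 27 * pvDigit a + 9 * pvDigit b + 3 * pvDigit c + pvDigit d < 81 := by
      have ha := pvDigit_bounds a; have hbb := pvDigit_bounds b
      have hc := pvDigit_bounds c; have hd := pvDigit_bounds d
      omega
    rw [pvDecodeN_shift k _ N' hv0 hv1 hb.1 hb.2]
    rw [pvChunks, ih]
  | case2 l h =>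
    rcases l with _ | ⟨a, _ | ⟨b, _ | ⟨c, _ | ⟨d, rest⟩⟩⟩⟩
    · simp [pvChunks, pvDecodeN]
    · simp [pvChunks, pvDecodeN]
    · simp [pvChunks, pvDecodeN]
    · simp [pvChunks, pvDecodeN]
    · exact absurd rfl (h a b c d rest)

lemma B_eq_chunks (text : String) : arrowDecode_alt text = String.ofList (pvChunks text.toList) := by
  simp only [arrowDecode_alt]
  rw [foldl_const]
  simp only [PySem.List.length_pyRange_one, Int.sub_zero, Int.toNat_natCast]
  rw [peel_iterate]
  rw [Nat.mul_div_cancel _ (by norm_num : 0 < 4)]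
  rw [B_decode]
  simp

-- ===== VERDICT (by name: the statement is the Claim_ definition above) =====
theorem arrowDecode_spec : Claim_equal_arrowDecode := by
  intro text _
  unfold Spec_arrowDecode
  rw [A_eq_chunks, B_eq_chunks]
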